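-- pv_equiv track=rewrite | github.com/mhostetter/galois | src/galois/_polys/_conversions.py | integer_to_poly
-- ===== SOURCE A (Python) =====
-- def integer_to_poly(integer: int, order: int, degree: int | None = None) -> list[int]:
--     """
--     Converts the integer representation of the polynomial to its coefficients in descending order.
--     """
--     if order == 2:
--         c = [int(bit) for bit in bin(integer)[2:]]
--     else:
--         c = []  # Coefficients in ascending order
--         while integer > 0:
--             q, r = divmod(integer, order)
--             c.append(r)
--             integer = q
--
--         # Ensure the coefficient list is not empty
--         if not c:
--             c = [0]
--
--         c = c[::-1]  # Coefficients in descending order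
--
--     # Set to a fixed degree if requested
--     if degree is not None:
--         assert degree >= len(c) - 1
--         c = [0] * (degree - len(c) + 1) + c
--
--     return c
-- ===== SOURCE B (Python) =====
-- def integer_to_poly(integer: int, order: int, degree: int | None = None) -> list[int]:
--     """
--     Converts the integer representation of the polynomial to its coefficients in descending order.
--     """
--     if integer <= 0:
--         c = [0]
--     else:
--         # Number of base-`order` digits of `integer`
--         n = 0
--         power = 1
--         while power <= integer:
--             power *= order
--             n += 1
--         # Coefficients directly in descending order
--         c = [(integer // order**pos) % order for pos in range(n - 1, -1, -1)]
--
--     # Set to a fixed degree if requested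
--     if degree is not None:
--         assert degree >= len(c) - 1
--         c = [0] * (degree - len(c) + 1) + c
--
--     return c
-- ===== Notes on version B (the rewrite author's own statement) =====
-- stated objective: alternative
-- what changed: B replaces A's special bin() branch for order 2 and its append-and-reverse divmod loop by one digit-count loop followed by computing each coefficient directly in descending order as (integer // order**pos) % order.
-- outside the precondition, e.g. on integer_to_poly(5, -3, None): A returns [-1], B returns [-2, -1]; on integer_to_poly(5, 0, None): A raises ZeroDivisionError, B does not finish within the time limit
import Mathlib
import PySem

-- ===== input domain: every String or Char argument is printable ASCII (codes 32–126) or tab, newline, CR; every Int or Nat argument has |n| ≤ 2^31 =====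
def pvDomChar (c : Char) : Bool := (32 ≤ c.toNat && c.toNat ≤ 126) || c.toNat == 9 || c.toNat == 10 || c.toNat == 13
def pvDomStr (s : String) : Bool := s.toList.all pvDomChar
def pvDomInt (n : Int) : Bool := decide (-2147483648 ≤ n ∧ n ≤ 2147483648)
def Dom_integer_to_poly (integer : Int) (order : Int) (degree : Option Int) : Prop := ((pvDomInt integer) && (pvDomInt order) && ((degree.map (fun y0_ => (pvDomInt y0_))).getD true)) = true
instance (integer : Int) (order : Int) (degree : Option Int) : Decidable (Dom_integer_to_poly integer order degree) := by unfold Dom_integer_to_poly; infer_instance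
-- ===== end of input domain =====

-- B changes the decomposition: one digit-count loop, then the coefficients computed directly in
-- descending order, replacing A's append-and-reverse divmod loop and its special bin() branch
-- for order 2; objective: alternative decomposition, equal return values on Pre_.

-- ===== PORT A =====
-- `bin(integer)[2:]` digit list, ported by hand as base-2 digit extraction (exact for
-- integer ≥ 0, which Pre_ guarantees on the order = 2 branch);
-- fuel only makes the recursion total, 64 never runs out on |integer| ≤ 2^31.
def pvBinDigits (fuel : Nat) (i : Int) : List Int :=
  match fuel with
  | 0 => []
  | f + 1 =>
    if i ≤ 1 then [i]
    else pvBinDigits f (PySem.Int.floordiv i 2) ++ [PySem.Int.mod i 2]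

-- A's `while integer > 0` divmod loop (fuel for totality only)
def pvALoop (fuel : Nat) (i o : Int) (c : List Int) : List Int :=
  match fuel with
  | 0 => c
  | f + 1 =>
    if 0 < i then pvALoop f (PySem.Int.floordiv i o) o (c ++ [PySem.Int.mod i o]) else c

def integer_to_poly (integer : Int) (order : Int) (degree : Option Int) : List Int :=
  let c : List Int :=
    if order = 2 then pvBinDigits 64 integer
    else
      let c0 := pvALoop 64 integer order []
      let c1 := if c0 = [] then [0] else c0
      c1.reverse
  match degree with
  | none => c
  | some d => List.replicate (d - (c.length : Int) + 1).toNat 0 ++ c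

-- ===== PORT B =====
-- B's `while power <= integer` digit-count loop (fuel for totality only)
def pvDigitCount (fuel : Nat) (i o power n : Int) : Int :=
  match fuel with
  | 0 => n
  | f + 1 =>
    if power ≤ i then pvDigitCount f i o (power * o) (n + 1) else n

def integer_to_poly_alt (integer : Int) (order : Int) (degree : Option Int) : List Int :=
  let c : List Int :=
    if integer ≤ 0 then [0]
    else
      let n := pvDigitCount 64 integer order 1 0
      (PySem.List.pyRange (n - 1) (-1) (-1)).map
        (fun pos => PySem.Int.mod (PySem.Int.floordiv integer (order ^ pos.toNat)) order)
  match degree with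
  | none => c
  | some d => List.replicate (d - (c.length : Int) + 1).toNat 0 ++ c

-- ===== PRECONDITION & SPEC =====
-- Pre_ restricts to the function's natural base-conversion domain and to inputs where A returns:
-- order < 2 with a positive integer (meaningless mixed-sign digits for a negative order, a hang
-- for order 1, ZeroDivisionError for order 0) is excluded, as are order = 2 with a negative
-- integer (A raises ValueError) and a requested degree below the number of digits
-- (AssertionError). The `31 ≤ x ∨ …` disjunct only keeps the power computable: on Dom
-- (integer ≤ 2^31 < order^32 for order ≥ 2) it is equivalent to integer < order^(x+1).
def Pre_integer_to_poly (integer : Int) (order : Int) (degree : Option Int) : Prop :=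
  (2 ≤ order ∨ integer ≤ 0) ∧ (order = 2 → 0 ≤ integer) ∧
    (∀ x ∈ degree, 0 ≤ x ∧ (0 < integer → 31 ≤ x ∨ integer < order ^ (x + 1).toNat))
instance (integer : Int) (order : Int) (degree : Option Int) : Decidable (Pre_integer_to_poly integer order degree) := by
  unfold Pre_integer_to_poly; infer_instance

def pvWitness_integer_to_poly : Int × Int × Option Int := (11, 3, some 4)

def Spec_integer_to_poly (integer : Int) (order : Int) (degree : Option Int) (out : List Int) : Prop := out = integer_to_poly_alt integer order degree
instance (integer : Int) (order : Int) (degree : Option Int) (out : List Int) : Decidable (Spec_integer_to_poly integer order degree out) := by unfold Spec_integer_to_poly; infer_instance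

-- ===== CLAIM (what is proved, stated in full; the proofs are below) =====
def Claim_equal_integer_to_poly : Prop := ∀ (integer : Int) (order : Int) (degree : Option Int), Dom_integer_to_poly integer order degree → Pre_integer_to_poly integer order degree → Spec_integer_to_poly integer order degree (integer_to_poly integer order degree)


-- ===== LEMMAS AND PROOFS =====

-- A's loop produces the ascending base-o' digits
lemma pvALoop_digits (o' : Nat) (ho : 2 ≤ o') :
    ∀ (fuel : Nat) (i' : Nat) (c : List Int), i' < o' ^ fuel →
      pvALoop fuel (i' : Int) (o' : Int) c = c ++ (Nat.digits o' i').map (fun d : Nat => (d : Int)) := by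
  intro fuel
  induction fuel with
  | zero =>
    intro i' c h
    have : i' = 0 := by simpa using h
    subst this; simp [pvALoop]
  | succ f ih =>
    intro i' c h
    by_cases hz : i' = 0
    · subst hz; simp [pvALoop]
    · have hpos : (0 : Int) < (i' : Int) := by exact_mod_cast Nat.pos_of_ne_zero hz
      rw [pvALoop, if_pos hpos, PySem.Int.floordiv_natCast, PySem.Int.mod_natCast,
        ih (i' / o') (c ++ [((i' % o' : Nat) : Int)]) ?_]
      · rw [Nat.digits_def' (by omega : 1 < o') (Nat.pos_of_ne_zero hz), List.append_assoc]
        simp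
      · rw [pow_succ] at h
        exact Nat.div_lt_of_lt_mul (Nat.mul_comm o' (o' ^ f) ▸ h)

-- the loop does nothing on a nonpositive integer
lemma pvALoop_nonpos (fuel : Nat) (i o : Int) (c : List Int) (h : ¬ 0 < i) :
    pvALoop fuel i o c = c := by
  cases fuel with
  | zero => rfl
  | succ f => rw [pvALoop, if_neg h]

-- the bin() branch produces the descending base-2 digits
lemma pvBinDigits_digits :
    ∀ (fuel : Nat) (i' : Nat), 0 < i' → i' < 2 ^ fuel →
      pvBinDigits fuel (i' : Int) = ((Nat.digits 2 i').map (fun d : Nat => (d : Int))).reverse := by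
  intro fuel
  induction fuel with
  | zero => intro i' h1 h2; omega
  | succ f ih =>
    intro i' h1 h2
    by_cases hone : i' = 1
    · subst hone; simp [pvBinDigits]
    · have hge : 2 ≤ i' := by omega
      have hle : ¬ ((i' : Int) ≤ 1) := by exact_mod_cast (by omega : ¬ i' ≤ 1)
      rw [pvBinDigits, if_neg hle]
      have h2' : PySem.Int.floordiv (i' : Int) 2 = ((i' / 2 : Nat) : Int) := by
        exact_mod_cast PySem.Int.floordiv_natCast i' 2
      have h3' : PySem.Int.mod (i' : Int) 2 = ((i' % 2 : Nat) : Int) := by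
        exact_mod_cast PySem.Int.mod_natCast i' 2
      rw [h2', h3', ih (i' / 2) (by omega)
        (Nat.div_lt_of_lt_mul (Nat.mul_comm 2 (2 ^ f) ▸ (pow_succ 2 f ▸ h2)))]
      rw [Nat.digits_def' (by omega : 1 < 2) (by omega : 0 < i')]
      simp

-- B's count loop computes the number of digits
lemma pvDigitCount_eq (o' i' : Nat) :
    ∀ (fuel n0 : Nat), i' < o' ^ (n0 + fuel) →
      pvDigitCount fuel (i' : Int) (o' : Int) ((o' ^ n0 : Nat) : Int) (n0 : Int) =
        if i' < o' ^ n0 then (n0 : Int) else ((Nat.log o' i' + 1 : Nat) : Int) := by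
  intro fuel
  induction fuel with
  | zero =>
    intro n0 h
    rw [Nat.add_zero] at h
    simp [pvDigitCount, if_pos h]
  | succ f ih =>
    intro n0 h
    by_cases hlt : i' < o' ^ n0
    · have : ¬ (((o' ^ n0 : Nat) : Int) ≤ (i' : Int)) := by exact_mod_cast Nat.not_le.mpr hlt
      rw [pvDigitCount, if_neg this, if_pos hlt]
    · have hle : ((o' ^ n0 : Nat) : Int) ≤ (i' : Int) := by exact_mod_cast Nat.not_lt.mp hlt
      rw [pvDigitCount, if_pos hle]
      have hpow : ((o' ^ n0 : Nat) : Int) * (o' : Int) = ((o' ^ (n0 + 1) : Nat) : Int) := by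
        push_cast [pow_succ]; ring
      have hn : ((n0 : Int) + 1) = ((n0 + 1 : Nat) : Int) := by push_cast; ring
      have harg : i' < o' ^ ((n0 + 1) + f) := by
        have he : n0 + (f + 1) = (n0 + 1) + f := by omega
        rwa [he] at h
      rw [hpow, hn, ih (n0 + 1) harg, if_neg hlt]
      by_cases h2 : i' < o' ^ (n0 + 1)
      · rw [if_pos h2, Nat.log_eq_of_pow_le_of_lt_pow (Nat.not_lt.mp hlt) h2]
      · rw [if_neg h2]

lemma digits_getD (o' : Nat) (ho : 2 ≤ o') :
    ∀ (i' j : Nat), (Nat.digits o' i').getD j 0 = i' / o' ^ j % o' := by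
  intro i'
  induction i' using Nat.strong_induction_on with
  | _ i' ih =>
    intro j
    by_cases hz : i' = 0
    · subst hz; simp
    · rw [Nat.digits_def' (by omega : 1 < o') (Nat.pos_of_ne_zero hz)]
      cases j with
      | zero => simp
      | succ j =>
        have hlt : i' / o' < i' := Nat.div_lt_self (Nat.pos_of_ne_zero hz) (by omega)
        simp only [List.getD_cons_succ, ih (i' / o') hlt j]
        rw [Nat.div_div_eq_div_mul, pow_succ, Nat.mul_comm (o' ^ j) o']

-- B's core list is the descending digit list
lemma bcore_eq (o' i' : Nat) (ho : 2 ≤ o') (hi : 0 < i') (hiD : i' ≤ 2147483648) :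
    (PySem.List.pyRange (pvDigitCount 64 (i' : Int) (o' : Int) 1 0 - 1) (-1) (-1)).map
        (fun pos => PySem.Int.mod (PySem.Int.floordiv (i' : Int) ((o' : Int) ^ pos.toNat)) (o' : Int)) =
      ((Nat.digits o' i').map (fun d : Nat => (d : Int))).reverse := by
  have hfuel : i' < o' ^ (0 + 64) := by
    calc i' ≤ 2147483648 := hiD
    _ < 2 ^ 64 := by norm_num
    _ ≤ o' ^ (0 + 64) := Nat.pow_le_pow_left ho _
  have hcnt := pvDigitCount_eq o' i' 64 0 hfuel
  simp only [pow_zero, Nat.cast_one, Nat.cast_zero] at hcnt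
  rw [if_neg (by omega)] at hcnt
  set L := Nat.log o' i' + 1 with hL
  rw [hcnt, PySem.List.pyRange_neg_one, List.map_map]
  have hlen : (Nat.digits o' i').length = L := Nat.digits_len o' i' (by omega) (by omega)
  have hT : (((L : Int) - 1) - (-1)).toNat = L := by omega
  rw [hT]
  rw [← List.map_reverse]
  apply List.ext_getElem
  · simp [hlen]
  · intro j h1 h2
    rw [List.getElem_map, List.getElem_map, List.getElem_range, List.getElem_reverse]
    simp only [hlen, Function.comp_apply]
    have hj : j < L := by simpa using h1
    have he1 : ((L : Int) - 1 - (j : Int)) = ((L - 1 - j : Nat) : Int) := by omega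
    rw [he1]
    have he2 : (((L - 1 - j : Nat) : Int)).toNat = L - 1 - j := Int.toNat_natCast _
    rw [he2]
    have he3 : ((o' : Int)) ^ (L - 1 - j) = ((o' ^ (L - 1 - j) : Nat) : Int) := by push_cast; ring
    rw [he3, PySem.Int.floordiv_natCast, PySem.Int.mod_natCast]
    have he4 : (Nat.digits o' i')[L - 1 - j] = (Nat.digits o' i').getD (L - 1 - j) 0 := by
      rw [List.getD_eq_getElem _ _ (by omega)]
    rw [he4, digits_getD o' ho]

-- ===== VERDICT (by name: the statement is the Claim_ definition above) =====
theorem integer_to_poly_spec : Claim_equal_integer_to_poly := by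
  intro i o d hDom hPre
  obtain ⟨hp1, hp2, _⟩ := hPre
  unfold Spec_integer_to_poly integer_to_poly integer_to_poly_alt
  have hDom' : i ≤ 2147483648 := by
    simp only [Dom_integer_to_poly, pvDomInt, Bool.and_eq_true, decide_eq_true_eq] at hDom
    exact hDom.1.1.2
  have hcore :
      (if o = 2 then pvBinDigits 64 i
       else
         let c0 := pvALoop 64 i o []
         let c1 := if c0 = [] then [0] else c0
         c1.reverse) =
      (if i ≤ 0 then ([0] : List Int)
       else
         let n := pvDigitCount 64 i o 1 0
         (PySem.List.pyRange (n - 1) (-1) (-1)).map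
           (fun pos => PySem.Int.mod (PySem.Int.floordiv i (o ^ pos.toNat)) o)) := by
    by_cases hi : i ≤ 0
    · rw [if_pos hi]
      by_cases ho2 : o = 2
      · have : i = 0 := by have := hp2 ho2; omega
        subst this; rw [if_pos ho2]; simp [pvBinDigits]
      · rw [if_neg ho2]
        simp [pvALoop_nonpos 64 i o [] (by omega)]
    · rw [if_neg hi]
      have ho : 2 ≤ o := by rcases hp1 with h | h; exact h; omega
      have hi' : i = ((i.toNat : Nat) : Int) := by omega
      have ho' : o = ((o.toNat : Nat) : Int) := by omega
      have hoN : 2 ≤ o.toNat := by omega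
      have hiN : 0 < i.toNat := by omega
      have hiDN : i.toNat ≤ 2147483648 := by omega
      rw [hi', ho']
      rw [bcore_eq o.toNat i.toNat hoN hiN hiDN]
      by_cases ho2 : o = 2
      · have : o.toNat = 2 := by omega
        rw [if_pos (by rw [← ho']; exact ho2), this]
        exact pvBinDigits_digits 64 i.toNat hiN (by omega)
      · rw [if_neg (by rw [← ho']; exact ho2)]
        have hfuel : i.toNat < o.toNat ^ 64 := by
          calc i.toNat ≤ 2147483648 := hiDN
          _ < 2 ^ 64 := by norm_num
          _ ≤ o.toNat ^ 64 := Nat.pow_le_pow_left hoN _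
        rw [pvALoop_digits o.toNat hoN 64 i.toNat [] hfuel]
        have hne : Nat.digits o.toNat i.toNat ≠ [] := by
          rw [Nat.digits_ne_nil_iff_ne_zero]; omega
        simp [hne]
  rw [hcore]
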